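-- pv_equiv track=rewrite | github.com/crapas1974/algo2 | result/ds/02_segment_count.py | segmentations
-- ===== SOURCE A (Python) =====
-- def segmentations(arr, prefix_list = None, result = None):
--     if prefix_list == None:
--         prefix_list = []
--     if result == None:
--         result = []
--     if not arr:
--         result.append(prefix_list)
--         return result
--     head = arr[0]
--     tail = arr[1:]
--     segmentations(tail, prefix_list + [[head]], result)
--     if prefix_list:
--         segmentations(tail, prefix_list[:-1] + [prefix_list[-1] + [head]], result)
--     return result
-- ===== SOURCE B (Python) =====
-- def segmentations(arr, prefix_list=None, result=None):
--     if prefix_list == None: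
--         prefix_list = []
--     if result == None:
--         result = []
--     n = len(arr)
--     if n == 0:
--         result.append(prefix_list)
--         return result
--     # one choice bit per internal gap (plus the prefix/arr boundary when prefix_list
--     # is nonempty); bit 0 = start a new segment, bit 1 = extend the last one.
--     choices = [bool(prefix_list)] + [True] * (n - 1)
--     k = choices.count(True)
--     for mask in range(1 << k):
--         seg = list(prefix_list)
--         idx = k
--         for x, c in zip(arr, choices):
--             if c:
--                 idx -= 1
--                 extend = (mask >> idx) & 1 == 1
--             else:
--                 extend = False
--             if extend:
--                 seg = seg[:-1] + [seg[-1] + [x]]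
--             else:
--                 seg = seg + [[x]]
--         result.append(seg)
--     return result
-- ===== Notes on version B (the rewrite author's own statement) =====
-- stated objective: alternative
-- what changed: Replaces A's binary recursion (recurse twice per element, cut vs extend) by a single iterative enumeration of the 2^k gap-decision bitmasks, building each segmentation in one left-to-right pass; output order is preserved because the earliest gap is the most significant bit and 'new segment' (0) precedes 'extend' (1).
import Mathlib
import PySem

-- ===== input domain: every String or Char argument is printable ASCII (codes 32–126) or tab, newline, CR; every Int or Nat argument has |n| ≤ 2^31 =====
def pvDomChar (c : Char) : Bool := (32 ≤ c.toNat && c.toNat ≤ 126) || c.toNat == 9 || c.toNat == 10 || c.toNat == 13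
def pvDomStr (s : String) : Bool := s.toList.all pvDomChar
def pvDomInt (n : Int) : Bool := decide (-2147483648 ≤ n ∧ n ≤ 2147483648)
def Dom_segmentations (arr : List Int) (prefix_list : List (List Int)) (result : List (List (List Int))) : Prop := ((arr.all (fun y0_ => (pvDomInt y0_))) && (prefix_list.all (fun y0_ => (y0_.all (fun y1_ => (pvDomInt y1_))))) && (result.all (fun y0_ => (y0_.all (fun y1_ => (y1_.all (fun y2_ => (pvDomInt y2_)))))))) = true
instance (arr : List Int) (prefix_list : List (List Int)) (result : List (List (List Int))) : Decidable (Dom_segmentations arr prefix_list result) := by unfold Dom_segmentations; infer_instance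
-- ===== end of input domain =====

-- B replaces A's binary recursion by a single loop over the 2^k gap-decision
-- bitmasks, building each segmentation in one left-to-right pass (objective:
-- alternative decomposition, iterative enumeration instead of recursion).
-- Both A and B mutate/extend the passed-in `result` list the same way; the
-- theorems below are about the returned value.

-- ===== PORT A =====
def segmentations (arr : List Int) (prefix_list : List (List Int)) (result : List (List (List Int))) : List (List (List Int)) :=
  match arr with
  | [] => result ++ [prefix_list]
  | head :: tail =>
    let r := segmentations tail (prefix_list ++ [[head]]) result
    if prefix_list.isEmpty then r
    else segmentations tail (prefix_list.dropLast ++ [prefix_list.getLast! ++ [head]]) r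

-- ===== PORT B =====
-- the inner `for x, c in zip(arr, choices)` loop of Source B, state = (seg, idx)
def segLoop (mask : Nat) : List (Int × Bool) → List (List Int) × Nat → List (List Int) × Nat
  | [], st => st
  | (x, c) :: rest, (seg, idx) =>
    if c then
      let idx' := idx - 1
      if (mask >>> idx') % 2 = 1 then
        segLoop mask rest (seg.dropLast ++ [seg.getLast! ++ [x]], idx')
      else
        segLoop mask rest (seg ++ [[x]], idx')
    else
      segLoop mask rest (seg ++ [[x]], idx)

def segmentations_alt (arr : List Int) (prefix_list : List (List Int)) (result : List (List (List Int))) : List (List (List Int)) :=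
  let n := arr.length
  if n = 0 then result ++ [prefix_list]
  else
    let choices := (!prefix_list.isEmpty) :: List.replicate (n - 1) true
    let k := PySem.List.count choices true
    (List.range (2 ^ k)).foldl
      (fun res mask => res ++ [(segLoop mask (arr.zip choices) (prefix_list, k)).1])
      result

-- ===== PRECONDITION & SPEC =====
def Spec_segmentations (arr : List Int) (prefix_list : List (List Int)) (result : List (List (List Int))) (out : List (List (List Int))) : Prop := out = segmentations_alt arr prefix_list result
instance (arr : List Int) (prefix_list : List (List Int)) (result : List (List (List Int))) (out : List (List (List Int))) : Decidable (Spec_segmentations arr prefix_list result out) := by unfold Spec_segmentations; infer_instance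

-- ===== CLAIM (what is proved, stated in full; the proofs are below) =====
def Claim_equal_segmentations : Prop := ∀ (arr : List Int) (prefix_list : List (List Int)) (result : List (List (List Int))), Dom_segmentations arr prefix_list result → Spec_segmentations arr prefix_list result (segmentations arr prefix_list result)

-- ===== LEMMAS AND PROOFS =====

-- A only appends to the accumulator
theorem seg_acc (arr : List Int) (p : List (List Int)) (res : List (List (List Int))) :
    segmentations arr p res = res ++ segmentations arr p [] := by
  induction arr generalizing p res with
  | nil => simp [segmentations]
  | cons h t ih =>
    simp only [segmentations]
    by_cases hp : p.isEmpty
    · simp only [hp, if_pos]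
      exact ih _ _
    · simp only [hp, Bool.false_eq_true, if_neg, not_false_iff]
      rw [ih (p ++ [[h]]) res, ih _ (res ++ segmentations t (p ++ [[h]]) []),
          ih _ (segmentations t (p ++ [[h]]) [])]
      simp

-- segLoop over an all-true choice list only reads the low `t.length` bits of the mask
theorem segLoop_mod (t : List Int) (q : List (List Int)) (m : Nat) :
    segLoop m (t.zip (List.replicate t.length true)) (q, t.length)
      = segLoop (m % 2 ^ t.length) (t.zip (List.replicate t.length true)) (q, t.length) := by
  induction t generalizing q m with
  | nil => simp [segLoop]
  | cons h t ih =>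
    have hbit : (m % 2 ^ (t.length + 1)) >>> t.length % 2 = m >>> t.length % 2 := by
      rw [Nat.shiftRight_eq_div_pow, Nat.shiftRight_eq_div_pow, pow_succ,
          Nat.mod_mul_right_div_self]
      omega
    have hmm : m % 2 ^ (t.length + 1) % 2 ^ t.length = m % 2 ^ t.length :=
      Nat.mod_mod_of_dvd _ (pow_dvd_pow 2 (Nat.le_succ _))
    simp only [List.length_cons, List.replicate_succ, List.zip_cons_cons, segLoop,
      Nat.add_sub_cancel, if_true]
    rw [hbit]
    by_cases hb : m >>> t.length % 2 = 1
    · simp only [hb, if_pos]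
      rw [ih, ih _ (m % 2 ^ (t.length + 1)), hmm]
    · simp only [hb, if_neg, not_false_iff]
      rw [ih, ih _ (m % 2 ^ (t.length + 1)), hmm]

-- core correspondence: A's pure recursion = the bitmask enumeration
theorem seg_main (t : List Int) (p : List (List Int)) (hp : p ≠ []) :
    segmentations t p []
      = (List.range (2 ^ t.length)).map
          (fun m => (segLoop m (t.zip (List.replicate t.length true)) (p, t.length)).1) := by
  induction t generalizing p with
  | nil => simp [segmentations, segLoop]
  | cons h t ih =>
    have hpe : p.isEmpty = false := by simpa [List.isEmpty_iff] using hp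
    have hsplit : List.range (2 ^ (t.length + 1))
        = List.range (2 ^ t.length) ++ (List.range (2 ^ t.length)).map (2 ^ t.length + ·) := by
      rw [show (2 : Nat) ^ (t.length + 1) = 2 ^ t.length + 2 ^ t.length by ring, List.range_add]
    simp only [segmentations, hpe, Bool.false_eq_true, if_neg, not_false_iff]
    rw [seg_acc, ih (p ++ [[h]]) (by simp), ih (p.dropLast ++ [p.getLast! ++ [h]]) (by simp)]
    rw [List.length_cons, hsplit, List.map_append, List.map_map]
    congr 1
    · apply List.map_congr_left
      intro m hm
      have hlt : m < 2 ^ t.length := List.mem_range.mp hm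
      have h0 : m >>> t.length % 2 = 0 := by
        rw [Nat.shiftRight_eq_div_pow, Nat.div_eq_of_lt hlt]
      simp [List.replicate_succ, segLoop, h0]
    · apply List.map_congr_left
      intro m hm
      have hlt : m < 2 ^ t.length := List.mem_range.mp hm
      have hp2 : 0 < 2 ^ t.length := Nat.two_pow_pos _
      have h1 : (2 ^ t.length + m) >>> t.length % 2 = 1 := by
        rw [Nat.shiftRight_eq_div_pow, Nat.add_comm, Nat.add_div_right _ hp2,
            Nat.div_eq_of_lt hlt]
      have hmod : (2 ^ t.length + m) % 2 ^ t.length = m := by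
        rw [Nat.add_mod_left]
        exact Nat.mod_eq_of_lt hlt
      simp only [List.replicate_succ, List.zip_cons_cons, segLoop, Nat.add_sub_cancel,
        if_true, h1, Function.comp_apply]
      rw [segLoop_mod t _ (2 ^ t.length + m), hmod]

-- fold that appends singletons = append of a map
theorem foldl_snoc {α β : Type} (f : α → β) (l : List α) (res : List β) :
    l.foldl (fun r m => r ++ [f m]) res = res ++ l.map f := by
  induction l generalizing res with
  | nil => simp
  | cons h t ih => simp [ih]

-- ===== VERDICT (by name: the statement is the Claim_ definition above) =====
theorem segmentations_spec : Claim_equal_segmentations := by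
  intro arr p res _
  show segmentations arr p res = segmentations_alt arr p res
  cases arr with
  | nil => simp [segmentations, segmentations_alt]
  | cons h t =>
    simp only [segmentations_alt, List.length_cons, Nat.succ_ne_zero, if_neg,
      not_false_iff, Nat.add_sub_cancel, PySem.List.count_eq]
    by_cases hp : p.isEmpty
    · have hpnil : p = [] := List.isEmpty_iff.mp hp
      subst hpnil
      rw [show segmentations (h :: t) [] res = segmentations t [[h]] res from by
        simp [segmentations]]
      rw [seg_acc, seg_main t [[h]] (by simp)]
      simp only [List.isEmpty_nil, Bool.not_true]
      have hc : List.count true (false :: List.replicate t.length true) = t.length := by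
        simp
      rw [hc, foldl_snoc]
      congr 1
    · simp only [hp, Bool.not_false]
      rw [seg_acc, seg_main (h :: t) p (fun hn => by simp [hn] at hp)]
      have hch : (true :: List.replicate t.length true) = List.replicate (h :: t).length true := by
        simp [List.replicate_succ]
      rw [hch, foldl_snoc]
      simp
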